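-- pv_equiv track=rewrite | github.com/steffi101/job-agent | run_agent_cloud.py | get_role_priority
-- ===== SOURCE A (Python) =====
-- def get_role_priority(title):
--     title_lower = title.lower()
--     if any(kw in title_lower for kw in ['product manager', 'product management', 'apm', 'associate product']):
--         return 1
--     elif any(kw in title_lower for kw in ['program manager', 'project manager', 'tpm', 'technical program']):
--         return 2
--     elif any(kw in title_lower for kw in ['data analyst', 'analytics', 'data scientist', 'business analyst']):
--         return 3
--     elif any(kw in title_lower for kw in ['operations', 'strategy', 'gtm', 'marketing', 'growth']):
--         return 4
--     elif any(kw in title_lower for kw in ['research', 'ai safety', 'policy', 'trust']):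
--         return 5
--     return 6
-- ===== SOURCE B (Python) =====
-- KEYWORD_PRIORITY = {
--     'product manager': 1, 'product management': 1, 'apm': 1, 'associate product': 1,
--     'program manager': 2, 'project manager': 2, 'tpm': 2, 'technical program': 2,
--     'data analyst': 3, 'analytics': 3, 'data scientist': 3, 'business analyst': 3,
--     'operations': 4, 'strategy': 4, 'gtm': 4, 'marketing': 4, 'growth': 4,
--     'research': 5, 'ai safety': 5, 'policy': 5, 'trust': 5,
-- }
--
-- def get_role_priority(title):
--     t = title.lower()
--     return min((p for kw, p in KEYWORD_PRIORITY.items() if kw in t), default=6)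
-- ===== Notes on version B (the rewrite author's own statement) =====
-- stated objective: alternative
-- what changed: Replaces the first-match if/elif chain by a flat keyword-to-priority map and a min-aggregation over all matching keywords (default 6); correct because each keyword carries its group's priority, so the minimum matched priority equals the first matching branch.
import Mathlib
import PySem

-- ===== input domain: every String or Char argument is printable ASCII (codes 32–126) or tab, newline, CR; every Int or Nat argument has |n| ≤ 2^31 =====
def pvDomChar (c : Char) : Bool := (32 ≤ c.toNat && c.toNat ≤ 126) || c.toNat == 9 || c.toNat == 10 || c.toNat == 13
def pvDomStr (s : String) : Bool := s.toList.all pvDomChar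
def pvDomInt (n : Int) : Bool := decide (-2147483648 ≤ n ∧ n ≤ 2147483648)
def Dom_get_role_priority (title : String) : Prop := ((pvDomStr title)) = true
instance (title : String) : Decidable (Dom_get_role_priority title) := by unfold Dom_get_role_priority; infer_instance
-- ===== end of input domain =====

-- B replaces A's first-match if/elif chain by a flat keyword→priority map and a min-aggregation
-- over all matching keywords (default 6); same behaviour, alternative algorithm.

-- ===== PORT A =====
def get_role_priority (title : String) : Int :=
  let title_lower := PySem.Str.lower title
  if PySem.Str.isIn "product manager" title_lower || PySem.Str.isIn "product management" title_lower ||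
     PySem.Str.isIn "apm" title_lower || PySem.Str.isIn "associate product" title_lower then 1
  else if PySem.Str.isIn "program manager" title_lower || PySem.Str.isIn "project manager" title_lower ||
     PySem.Str.isIn "tpm" title_lower || PySem.Str.isIn "technical program" title_lower then 2
  else if PySem.Str.isIn "data analyst" title_lower || PySem.Str.isIn "analytics" title_lower ||
     PySem.Str.isIn "data scientist" title_lower || PySem.Str.isIn "business analyst" title_lower then 3
  else if PySem.Str.isIn "operations" title_lower || PySem.Str.isIn "strategy" title_lower ||
     PySem.Str.isIn "gtm" title_lower || PySem.Str.isIn "marketing" title_lower ||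
     PySem.Str.isIn "growth" title_lower then 4
  else if PySem.Str.isIn "research" title_lower || PySem.Str.isIn "ai safety" title_lower ||
     PySem.Str.isIn "policy" title_lower || PySem.Str.isIn "trust" title_lower then 5
  else 6

-- ===== PORT B =====
-- KEYWORD_PRIORITY: dict[str, int] as an association list in insertion order
def pvKeywordPriority : List (String × Int) :=
  [("product manager", 1), ("product management", 1), ("apm", 1), ("associate product", 1),
   ("program manager", 2), ("project manager", 2), ("tpm", 2), ("technical program", 2),
   ("data analyst", 3), ("analytics", 3), ("data scientist", 3), ("business analyst", 3),
   ("operations", 4), ("strategy", 4), ("gtm", 4), ("marketing", 4), ("growth", 4),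
   ("research", 5), ("ai safety", 5), ("policy", 5), ("trust", 5)]

-- min((p for kw, p in KEYWORD_PRIORITY.items() if kw in t), default=6)
def get_role_priority_alt (title : String) : Int :=
  let t := PySem.Str.lower title
  ((PySem.List.min? ((pvKeywordPriority.filter (fun kp => PySem.Str.isIn kp.1 t)).map Prod.snd)
      (fun x => x)).getD 6)

-- ===== PRECONDITION & SPEC =====
def Spec_get_role_priority (title : String) (out : Int) : Prop := out = get_role_priority_alt title
instance (title : String) (out : Int) : Decidable (Spec_get_role_priority title out) := by unfold Spec_get_role_priority; infer_instance

-- ===== CLAIM (what is proved, stated in full; the proofs are below) =====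
def Claim_equal_get_role_priority : Prop := ∀ (title : String), Dom_get_role_priority title → Spec_get_role_priority title (get_role_priority title)

-- ===== LEMMAS AND PROOFS =====

-- min with a default returns m when m is present and minimal
lemma pv_minD_eq (xs : List Int) (m : Int) (hm : m ∈ xs) (hle : ∀ x ∈ xs, m ≤ x) :
    (PySem.List.min? xs (fun x => x)).getD 6 = m := by
  cases h : PySem.List.min? xs (fun x => x) with
  | none =>
      rw [PySem.List.min?_eq_none_iff] at h
      subst h; cases hm
  | some r =>
      have hr : r ∈ xs := PySem.List.min?_mem h
      have h1 : r ≤ m := PySem.List.min?_isMin h m hm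
      have h2 : m ≤ r := hle r hr
      simp [le_antisymm h1 h2]

-- the value of a listed keyword that matches is among the aggregated values
lemma pv_mem_vals (l : List (String × Int)) (p : String × Int → Bool) (kw : String) (v : Int)
    (hin : (kw, v) ∈ l) (hp : p (kw, v) = true) : v ∈ (l.filter p).map Prod.snd :=
  List.mem_map.2 ⟨(kw, v), List.mem_filter.2 ⟨hin, hp⟩, rfl⟩

-- every aggregated value is bounded below when every listed value that passes the filter is
lemma pv_vals_bound (l : List (String × Int)) (p : String × Int → Bool) (m : Int)
    (h : ∀ q ∈ l, p q = true → m ≤ q.2) : ∀ x ∈ (l.filter p).map Prod.snd, m ≤ x := by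
  intro x hx
  obtain ⟨q, hq, rfl⟩ := List.mem_map.1 hx
  exact h q (List.mem_of_mem_filter hq) (List.of_mem_filter hq)

-- ===== VERDICT (by name: the statement is the Claim_ definition above) =====
theorem get_role_priority_spec : Claim_equal_get_role_priority := by
  intro title _
  unfold Spec_get_role_priority get_role_priority get_role_priority_alt
  dsimp only
  set t := PySem.Str.lower title with ht
  set p : String × Int → Bool := fun kp => PySem.Str.isIn kp.1 t with hp
  split_ifs with h1 h2 h3 h4 h5
  · -- group 1: some keyword of priority 1 matches, everything matched has priority ≥ 1
    have hb : ∀ x ∈ ((pvKeywordPriority.filter p).map Prod.snd), (1:Int) ≤ x :=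
      pv_vals_bound pvKeywordPriority p 1 (by intro q hq _; fin_cases hq <;> norm_num)
    simp only [Bool.or_eq_true, or_assoc] at h1
    rcases h1 with hk | hk | hk | hk
    · exact (pv_minD_eq _ 1 (pv_mem_vals pvKeywordPriority p "product manager" 1 (by norm_num [pvKeywordPriority]) (by rw [hp]; exact hk)) hb).symm
    · exact (pv_minD_eq _ 1 (pv_mem_vals pvKeywordPriority p "product management" 1 (by norm_num [pvKeywordPriority]) (by rw [hp]; exact hk)) hb).symm
    · exact (pv_minD_eq _ 1 (pv_mem_vals pvKeywordPriority p "apm" 1 (by norm_num [pvKeywordPriority]) (by rw [hp]; exact hk)) hb).symm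
    · exact (pv_minD_eq _ 1 (pv_mem_vals pvKeywordPriority p "associate product" 1 (by norm_num [pvKeywordPriority]) (by rw [hp]; exact hk)) hb).symm
  · -- group 2: some keyword of priority 2 matches, everything matched has priority ≥ 2
    have hb : ∀ x ∈ ((pvKeywordPriority.filter p).map Prod.snd), (2:Int) ≤ x :=
      pv_vals_bound pvKeywordPriority p 2 (by intro q hq hpq; fin_cases hq <;> first | omega | simp_all)
    simp only [Bool.or_eq_true, or_assoc] at h2
    rcases h2 with hk | hk | hk | hk
    · exact (pv_minD_eq _ 2 (pv_mem_vals pvKeywordPriority p "program manager" 2 (by norm_num [pvKeywordPriority]) (by rw [hp]; exact hk)) hb).symm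
    · exact (pv_minD_eq _ 2 (pv_mem_vals pvKeywordPriority p "project manager" 2 (by norm_num [pvKeywordPriority]) (by rw [hp]; exact hk)) hb).symm
    · exact (pv_minD_eq _ 2 (pv_mem_vals pvKeywordPriority p "tpm" 2 (by norm_num [pvKeywordPriority]) (by rw [hp]; exact hk)) hb).symm
    · exact (pv_minD_eq _ 2 (pv_mem_vals pvKeywordPriority p "technical program" 2 (by norm_num [pvKeywordPriority]) (by rw [hp]; exact hk)) hb).symm
  · -- group 3: some keyword of priority 3 matches, everything matched has priority ≥ 3
    have hb : ∀ x ∈ ((pvKeywordPriority.filter p).map Prod.snd), (3:Int) ≤ x :=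
      pv_vals_bound pvKeywordPriority p 3 (by intro q hq hpq; fin_cases hq <;> first | omega | simp_all)
    simp only [Bool.or_eq_true, or_assoc] at h3
    rcases h3 with hk | hk | hk | hk
    · exact (pv_minD_eq _ 3 (pv_mem_vals pvKeywordPriority p "data analyst" 3 (by norm_num [pvKeywordPriority]) (by rw [hp]; exact hk)) hb).symm
    · exact (pv_minD_eq _ 3 (pv_mem_vals pvKeywordPriority p "analytics" 3 (by norm_num [pvKeywordPriority]) (by rw [hp]; exact hk)) hb).symm
    · exact (pv_minD_eq _ 3 (pv_mem_vals pvKeywordPriority p "data scientist" 3 (by norm_num [pvKeywordPriority]) (by rw [hp]; exact hk)) hb).symm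
    · exact (pv_minD_eq _ 3 (pv_mem_vals pvKeywordPriority p "business analyst" 3 (by norm_num [pvKeywordPriority]) (by rw [hp]; exact hk)) hb).symm
  · -- group 4: some keyword of priority 4 matches, everything matched has priority ≥ 4
    have hb : ∀ x ∈ ((pvKeywordPriority.filter p).map Prod.snd), (4:Int) ≤ x :=
      pv_vals_bound pvKeywordPriority p 4 (by intro q hq hpq; fin_cases hq <;> first | omega | simp_all)
    simp only [Bool.or_eq_true, or_assoc] at h4
    rcases h4 with hk | hk | hk | hk | hk
    · exact (pv_minD_eq _ 4 (pv_mem_vals pvKeywordPriority p "operations" 4 (by norm_num [pvKeywordPriority]) (by rw [hp]; exact hk)) hb).symm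
    · exact (pv_minD_eq _ 4 (pv_mem_vals pvKeywordPriority p "strategy" 4 (by norm_num [pvKeywordPriority]) (by rw [hp]; exact hk)) hb).symm
    · exact (pv_minD_eq _ 4 (pv_mem_vals pvKeywordPriority p "gtm" 4 (by norm_num [pvKeywordPriority]) (by rw [hp]; exact hk)) hb).symm
    · exact (pv_minD_eq _ 4 (pv_mem_vals pvKeywordPriority p "marketing" 4 (by norm_num [pvKeywordPriority]) (by rw [hp]; exact hk)) hb).symm
    · exact (pv_minD_eq _ 4 (pv_mem_vals pvKeywordPriority p "growth" 4 (by norm_num [pvKeywordPriority]) (by rw [hp]; exact hk)) hb).symm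
  · -- group 5: some keyword of priority 5 matches, everything matched has priority ≥ 5
    have hb : ∀ x ∈ ((pvKeywordPriority.filter p).map Prod.snd), (5:Int) ≤ x :=
      pv_vals_bound pvKeywordPriority p 5 (by intro q hq hpq; fin_cases hq <;> first | omega | simp_all)
    simp only [Bool.or_eq_true, or_assoc] at h5
    rcases h5 with hk | hk | hk | hk
    · exact (pv_minD_eq _ 5 (pv_mem_vals pvKeywordPriority p "research" 5 (by norm_num [pvKeywordPriority]) (by rw [hp]; exact hk)) hb).symm
    · exact (pv_minD_eq _ 5 (pv_mem_vals pvKeywordPriority p "ai safety" 5 (by norm_num [pvKeywordPriority]) (by rw [hp]; exact hk)) hb).symm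
    · exact (pv_minD_eq _ 5 (pv_mem_vals pvKeywordPriority p "policy" 5 (by norm_num [pvKeywordPriority]) (by rw [hp]; exact hk)) hb).symm
    · exact (pv_minD_eq _ 5 (pv_mem_vals pvKeywordPriority p "trust" 5 (by norm_num [pvKeywordPriority]) (by rw [hp]; exact hk)) hb).symm
  · -- no keyword matches: the filtered list is empty and the default 6 is returned
    have hnil : pvKeywordPriority.filter p = [] :=
      List.filter_eq_nil_iff.2 (by intro q hq; fin_cases hq <;> simp_all)
    simp [hnil, PySem.List.min?]
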